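-- pv_equiv track=rewrite | github.com/Ganon11/AdventCode | 2015/Day13/src/Day13.py | cost_of_arrangement
-- ===== SOURCE A (Python) =====
-- def cost_of_arrangement(arrangement, edges):
--   total = 0
--   for index in range(len(arrangement)):
--     person = arrangement[index]
--     neighbor1 = arrangement[index - 1]
--     nextindex = index + 1
--     if nextindex == len(arrangement):
--       nextindex = 0
--     neighbor2 = arrangement[nextindex]
--
--     total = total + edges[','.join([person, neighbor1])] + edges[','.join([person, neighbor2])]
--
--   return total
-- ===== SOURCE B (Python) =====
-- def cost_of_arrangement(arrangement, edges):
--   if not arrangement: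
--     return 0
--   # pass 1: list the directed edge keys the circle needs (both directions of each adjacency)
--   needed = []
--   prev = arrangement[-1]
--   for person in arrangement:
--     needed.append(prev + ',' + person)
--     needed.append(person + ',' + prev)
--     prev = person
--   # pass 2: count the demand for each distinct key
--   counts = {}
--   for key in needed:
--     counts[key] = counts.get(key, 0) + 1
--   # pass 3: one lookup per distinct key, weighted by its demand
--   total = 0
--   for key, demand in counts.items():
--     total += demand * edges[key]
--   return total
-- ===== Notes on version B (the rewrite author's own statement) =====
-- stated objective: alternative
-- what changed: Instead of two edge lookups per person while walking the circle, B stages the work: it lists the directed keys the circle demands, aggregates them into a demand counter, and finally does one lookup per distinct key weighted by its demand.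
import Mathlib
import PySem

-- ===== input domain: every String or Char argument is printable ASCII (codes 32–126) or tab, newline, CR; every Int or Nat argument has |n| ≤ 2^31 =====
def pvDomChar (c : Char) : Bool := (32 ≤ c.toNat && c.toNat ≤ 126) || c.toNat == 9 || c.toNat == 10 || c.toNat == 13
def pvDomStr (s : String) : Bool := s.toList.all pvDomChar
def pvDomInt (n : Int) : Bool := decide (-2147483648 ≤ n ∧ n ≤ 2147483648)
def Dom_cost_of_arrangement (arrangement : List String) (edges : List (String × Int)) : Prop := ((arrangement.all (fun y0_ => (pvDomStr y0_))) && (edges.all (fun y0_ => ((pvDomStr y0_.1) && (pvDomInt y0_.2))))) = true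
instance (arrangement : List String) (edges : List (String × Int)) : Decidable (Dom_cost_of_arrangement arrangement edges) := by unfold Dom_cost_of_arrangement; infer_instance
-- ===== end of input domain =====

-- B restructures the computation: it builds a demand counter of directed edge keys and folds
-- once over the edge table weighting each cost by its demand; equivalence is about the return value.

-- ===== PORT A =====
-- literal port of A: loop over indices, wrap the previous index via Python's negative
-- indexing (pyGetD) and the next index via the explicit `if nextindex == len` reset;
-- dict lookup edges[k] is first-match List.lookup (total via getD 0; Pre_ guarantees the key exists)
def cost_of_arrangement (arrangement : List String) (edges : List (String × Int)) : Int :=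
  (PySem.List.pyRange 0 arrangement.length 1).foldl (fun total index =>
    let person := PySem.List.pyGetD arrangement index ""
    let neighbor1 := PySem.List.pyGetD arrangement (index - 1) ""
    let nextindex := index + 1
    let nextindex := if nextindex = (arrangement.length : Int) then 0 else nextindex
    let neighbor2 := PySem.List.pyGetD arrangement nextindex ""
    total + (List.lookup (PySem.Str.join "," [person, neighbor1]) edges).getD 0
          + (List.lookup (PySem.Str.join "," [person, neighbor2]) edges).getD 0) 0

-- ===== PORT B =====
-- literal port of B: stage 1 builds the list of needed directed keys (arrangement[-1] is
-- pyGetD at -1, guarded by the emptiness check), stage 2 counts them into a dict,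
-- stage 3 folds over the counter items with one edges lookup per distinct key
-- (edges[key] is first-match List.lookup, total via getD 0; Pre_ guarantees the key exists)
def cost_of_arrangement_alt (arrangement : List String) (edges : List (String × Int)) : Int :=
  if arrangement = [] then 0
  else
    let needed := (arrangement.foldl
      (fun (st : List String × String) person =>
        (st.1 ++ [st.2 ++ "," ++ person, person ++ "," ++ st.2], person))
      ([], PySem.List.pyGetD arrangement (-1) "")).1
    let counts := needed.foldl
      (fun d k => PySem.Dict.insert d k (PySem.Dict.getD d k 0 + 1)) PySem.Dict.empty
    counts.items.foldl (fun total p => total + p.2 * (List.lookup p.1 edges).getD 0) 0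

-- ===== PRECONDITION & SPEC =====
-- Pre_: both directed keys of every circular adjacency are present in edges —
-- exactly the inputs on which Python A returns (otherwise it raises KeyError).
def Pre_cost_of_arrangement (arrangement : List String) (edges : List (String × Int)) : Prop :=
  ∀ p ∈ arrangement.zip (arrangement.drop 1 ++ arrangement.take 1),
    (p.1 ++ "," ++ p.2) ∈ edges.map Prod.fst ∧ (p.2 ++ "," ++ p.1) ∈ edges.map Prod.fst
instance (arrangement : List String) (edges : List (String × Int)) : Decidable (Pre_cost_of_arrangement arrangement edges) := by unfold Pre_cost_of_arrangement; infer_instance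

def pvWitness_cost_of_arrangement : List String × (List (String × Int)) :=
  (["a", "b"], [("a,b", 1), ("b,a", -2)])

def Spec_cost_of_arrangement (arrangement : List String) (edges : List (String × Int)) (out : Int) : Prop := out = cost_of_arrangement_alt arrangement edges
instance (arrangement : List String) (edges : List (String × Int)) (out : Int) : Decidable (Spec_cost_of_arrangement arrangement edges out) := by unfold Spec_cost_of_arrangement; infer_instance

-- ===== CLAIM (what is proved, stated in full; the proofs are below) =====
def Claim_equal_cost_of_arrangement : Prop := ∀ (arrangement : List String) (edges : List (String × Int)), Dom_cost_of_arrangement arrangement edges → Pre_cost_of_arrangement arrangement edges → Spec_cost_of_arrangement arrangement edges (cost_of_arrangement arrangement edges)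

-- ===== LEMMAS AND PROOFS =====

-- lookup of one edge key, with a default
def lkE (edges : List (String × Int)) (a b : String) : Int :=
  (List.lookup (a ++ "," ++ b) edges).getD 0

-- element of the arrangement at a Nat index
def xE (arrangement : List String) (i : ℕ) : String := arrangement.getD i ""

-- cyclic successor / predecessor on indices < n
def succN (n i : ℕ) : ℕ := if i + 1 = n then 0 else i + 1
def prevN (n i : ℕ) : ℕ := if i = 0 then n - 1 else i - 1

theorem join_pair (a b : String) : PySem.Str.join "," [a, b] = a ++ "," ++ b := by
  rw [← String.toList_inj]
  simp [PySem.Str.join, PySem.Chars.join, List.intercalate]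

theorem A_as_sum (arrangement : List String) (edges : List (String × Int)) :
    cost_of_arrangement arrangement edges
      = ∑ i ∈ Finset.range arrangement.length,
          (lkE edges (xE arrangement i) (xE arrangement (prevN arrangement.length i))
           + lkE edges (xE arrangement i) (xE arrangement (succN arrangement.length i))) := by
  unfold cost_of_arrangement
  rw [PySem.List.pyRange_zero_nat, List.foldl_map]
  rw [PySem.List.foldl_congr_mem' _ _ _
    (g := fun total k => total +
      (lkE edges (xE arrangement k) (xE arrangement (prevN arrangement.length k))
       + lkE edges (xE arrangement k) (xE arrangement (succN arrangement.length k)))) ?_]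
  · rw [PySem.List.foldl_add, zero_add]
    rfl
  · intro k hk acc
    simp only [List.mem_range] at hk
    have hne : arrangement ≠ [] := by
      intro h; rw [h] at hk; simp at hk
    simp only [join_pair]
    have hperson : PySem.List.pyGetD arrangement (↑k) "" = xE arrangement k :=
      PySem.List.pyGetD_natCast arrangement k ""
    have hprev : PySem.List.pyGetD arrangement (↑k - 1) "" = xE arrangement (prevN arrangement.length k) := by
      by_cases h0 : k = 0
      · subst h0
        norm_num
        rw [PySem.List.pyGetD_neg_one arrangement "" hne]
        rw [List.getLast_eq_getElem]
        simp [xE, prevN, List.getD_eq_getElem?_getD,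
          List.getElem?_eq_getElem (by omega : arrangement.length - 1 < arrangement.length)]
      · have hcast : (↑k - 1 : ℤ) = ((k - 1 : ℕ) : ℤ) := by omega
        rw [hcast, PySem.List.pyGetD_natCast]
        simp [xE, prevN, h0]
    have hnext : (if (↑k + 1 : ℤ) = (arrangement.length : ℤ) then (0:ℤ) else ↑k + 1)
        = ((succN arrangement.length k : ℕ) : ℤ) := by
      unfold succN; split <;> split <;> omega
    rw [hperson, hprev, hnext, PySem.List.pyGetD_natCast]
    show acc + lkE edges _ _ + lkE edges (xE arrangement k) (xE arrangement (succN arrangement.length k)) = _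
    ring

-- the key-listing fold of B, characterised as a flatMap over the (prev, person) pairs
theorem needed_fold (l : List String) (acc : List String) (p : String) :
    (l.foldl (fun (st : List String × String) person =>
        (st.1 ++ [st.2 ++ "," ++ person, person ++ "," ++ st.2], person)) (acc, p)).1
      = acc ++ ((p :: l).zip l).flatMap (fun q => [q.1 ++ "," ++ q.2, q.2 ++ "," ++ q.1]) := by
  induction l generalizing acc p with
  | nil => simp
  | cons a l ih => simp [ih, List.append_assoc]

-- summing a 2-element-block flatMap of keys
theorem sum_lookup_flatMap (l : List (String × String)) (g : String → Int) :
    ((l.flatMap (fun q => [q.1 ++ "," ++ q.2, q.2 ++ "," ++ q.1])).map g).sum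
      = (l.map (fun q => g (q.1 ++ "," ++ q.2) + g (q.2 ++ "," ++ q.1))).sum := by
  induction l with
  | nil => rfl
  | cons a l ih => simp [ih]; ring

-- over a duplicate-free key list, the indicator sum picks out one term
theorem sum_ite_mem (S : List String) (hnd : S.Nodup) (x : String) (hx : x ∈ S)
    (g : String → Int) :
    (S.map (fun k => if k = x then g k else 0)).sum = g x := by
  induction S with
  | nil => cases hx
  | cons a rest ih =>
    simp only [List.map_cons, List.sum_cons]
    simp only [List.nodup_cons] at hnd
    by_cases h : a = x
    · subst h
      have hzero : (rest.map (fun k => if k = a then g k else 0)).sum = 0 := by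
        have hc : ∀ k ∈ rest, (if k = a then g k else 0) = 0 := by
          intro k hk
          have : k ≠ a := fun he => hnd.1 (he ▸ hk)
          simp [this]
        rw [List.map_congr_left hc]
        simp
      rw [if_pos rfl, hzero]
      simp
    · have hx' : x ∈ rest := by
        cases hx with
        | head => exact absurd rfl h
        | tail _ hm => exact hm
      rw [if_neg h, zero_add, ih hnd.2 hx']

-- grouping a sum by distinct key: Σ_k∈S count(k, ks)·g(k) = Σ_k∈ks g(k)
theorem sum_count_group (S : List String) (hnd : S.Nodup) (ks : List String)
    (hsub : ∀ y ∈ ks, y ∈ S) (g : String → Int) :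
    (S.map (fun k => ((ks.count k : ℕ) : Int) * g k)).sum = (ks.map g).sum := by
  induction ks with
  | nil => simp
  | cons x ks ih =>
    simp only [List.map_cons, List.sum_cons]
    have hsplit : ∀ k ∈ S,
        ((((x :: ks).count k : ℕ)) : Int) * g k
          = (if k = x then g k else 0) + ((ks.count k : ℕ) : Int) * g k := by
      intro k _
      rw [List.count_cons]
      by_cases h : k = x
      · have hb : (x == k) = true := beq_iff_eq.mpr h.symm
        rw [if_pos h, hb, if_pos rfl, h]
        push_cast
        ring
      · have hb : (x == k) = false := by
          simp only [beq_eq_false_iff_ne]; exact fun he => h he.symm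
        rw [if_neg h, hb, if_neg Bool.false_ne_true]
        push_cast
        ring
    rw [List.map_congr_left hsplit, PySem.List.sum_map_add_int,
      sum_ite_mem S hnd x (hsub x List.mem_cons_self) g,
      ih (fun y hy => hsub y (List.mem_cons_of_mem x hy))]

theorem B_as_sum (arrangement : List String) (edges : List (String × Int))
    (hne : arrangement ≠ []) :
    cost_of_arrangement_alt arrangement edges
      = ∑ i ∈ Finset.range arrangement.length,
          (lkE edges (xE arrangement (prevN arrangement.length i)) (xE arrangement i)
           + lkE edges (xE arrangement i) (xE arrangement (prevN arrangement.length i))) := by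
  have key : ∀ ks : List String,
      ((PySem.Dict.counter ks).items).foldl
          (fun total p => total + p.2 * (List.lookup p.1 edges).getD 0) 0
        = (ks.map (fun k => (List.lookup k edges).getD 0)).sum := by
    intro ks
    rw [PySem.Dict.items_counter, PySem.List.foldl_add, zero_add, List.map_map]
    exact sum_count_group (PySem.Set.ofList ks) (PySem.Set.nodup_ofList ks) ks
      (fun y hy => (PySem.Set.mem_ofList ks y).mpr hy) _
  unfold cost_of_arrangement_alt
  rw [if_neg hne]
  simp only [needed_fold, List.nil_append]
  rw [PySem.Dict.foldl_insert_getD_add_one_eq_counter, key, sum_lookup_flatMap]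
  have hmap : (((PySem.List.pyGetD arrangement (-1) "" :: arrangement).zip arrangement).map
      (fun q => (List.lookup (q.1 ++ "," ++ q.2) edges).getD 0
        + (List.lookup (q.2 ++ "," ++ q.1) edges).getD 0))
      = (List.range arrangement.length).map
        (fun i => lkE edges (xE arrangement (prevN arrangement.length i)) (xE arrangement i)
          + lkE edges (xE arrangement i) (xE arrangement (prevN arrangement.length i))) := by
    apply List.ext_getElem
    · simp
    · intro i h1 h2
      simp only [List.getElem_map, List.getElem_zip, List.getElem_range]
      have hn : i < arrangement.length := by simp at h2; omega
      have hx : xE arrangement i = arrangement[i] := by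
        simp [xE, List.getD_eq_getElem?_getD, List.getElem?_eq_getElem hn]
      have hfst : (PySem.List.pyGetD arrangement (-1) "" :: arrangement)[i]'(by simp; omega)
          = xE arrangement (prevN arrangement.length i) := by
        cases i with
        | zero =>
          simp only [List.getElem_cons_zero]
          rw [PySem.List.pyGetD_neg_one arrangement "" hne, List.getLast_eq_getElem]
          simp [xE, prevN, List.getD_eq_getElem?_getD,
            List.getElem?_eq_getElem (by omega : arrangement.length - 1 < arrangement.length)]
        | succ j =>
          simp only [List.getElem_cons_succ]
          simp [xE, prevN, List.getD_eq_getElem?_getD,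
            List.getElem?_eq_getElem (by omega : j < arrangement.length)]
      rw [hfst, hx]
      rfl
  rw [hmap]
  rfl

theorem sum_shift (n : ℕ) (g : ℕ → ℕ → Int) :
    (∑ i ∈ Finset.range n, g i (prevN n i)) = ∑ i ∈ Finset.range n, g (succN n i) i := by
  unfold prevN succN
  apply Finset.sum_nbij' (i := fun i => if i = 0 then n - 1 else i - 1)
    (j := fun i => if i + 1 = n then 0 else i + 1)
  · intro a ha; simp only [Finset.mem_range] at *; split <;> omega
  · intro a ha; simp only [Finset.mem_range] at *; split <;> omega
  · intro a ha; simp only [Finset.mem_range] at ha; split <;> split <;> omega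
  · intro a ha; simp only [Finset.mem_range] at ha; split <;> split <;> omega
  · intro a ha; simp only [Finset.mem_range] at ha
    have h1 : (if (if a = 0 then n - 1 else a - 1) + 1 = n then 0
        else (if a = 0 then n - 1 else a - 1) + 1) = a := by
      split <;> split at * <;> omega
    rw [h1]

-- ===== VERDICT (by name: the statement is the Claim_ definition above) =====
theorem cost_of_arrangement_spec : Claim_equal_cost_of_arrangement := by
  intro arrangement edges _ _
  unfold Spec_cost_of_arrangement
  by_cases hne : arrangement = []
  · subst hne; rfl
  · rw [A_as_sum, B_as_sum arrangement edges hne,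
      Finset.sum_add_distrib, Finset.sum_add_distrib]
    rw [sum_shift arrangement.length (fun a b => lkE edges (xE arrangement b) (xE arrangement a))]
    ring
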